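-- pv_equiv track=rewrite | github.com/jason-dio-so/inca-rag-scope | tools/step_next_n_routing_gate.py | _infer_card_type
-- ===== SOURCE A (Python) =====
-- from typing import List, Dict, Optional
--
-- def _infer_card_type(bullets: List[dict]) -> str:
--     """Infer card type from bullet structure"""
--     if not bullets:
--         return "UNKNOWN"
--
--     why_count = sum(1 for b in bullets if b.get("direction") == "WHY")
--     why_not_count = sum(1 for b in bullets if b.get("direction") == "WHY_NOT")
--
--     if why_count >= 1 and why_not_count >= 1:
--         return "BALANCED_EXPLAIN"
--     elif why_count > 0 and why_not_count == 0:
--         return "WHY_ONLY"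
--     else:
--         return "UNKNOWN"
-- ===== SOURCE B (Python) =====
-- def _infer_card_type(bullets):
--     """Single pass tracking existence of each direction, with early exit."""
--     has_why = False
--     has_why_not = False
--     for b in bullets:
--         d = b.get("direction")
--         if d == "WHY":
--             has_why = True
--         elif d == "WHY_NOT":
--             has_why_not = True
--         if has_why and has_why_not:
--             break
--     if has_why and has_why_not:
--         return "BALANCED_EXPLAIN"
--     if has_why:
--         return "WHY_ONLY"
--     return "UNKNOWN"
-- ===== Notes on version B (the rewrite author's own statement) =====
-- stated objective: alternative
-- what changed: Two counting comprehensions over all bullets are replaced by one existence-tracking loop maintaining two booleans that exits early once both directions were seen; the counts themselves are never computed and the empty-list guard disappears.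
import Mathlib
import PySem

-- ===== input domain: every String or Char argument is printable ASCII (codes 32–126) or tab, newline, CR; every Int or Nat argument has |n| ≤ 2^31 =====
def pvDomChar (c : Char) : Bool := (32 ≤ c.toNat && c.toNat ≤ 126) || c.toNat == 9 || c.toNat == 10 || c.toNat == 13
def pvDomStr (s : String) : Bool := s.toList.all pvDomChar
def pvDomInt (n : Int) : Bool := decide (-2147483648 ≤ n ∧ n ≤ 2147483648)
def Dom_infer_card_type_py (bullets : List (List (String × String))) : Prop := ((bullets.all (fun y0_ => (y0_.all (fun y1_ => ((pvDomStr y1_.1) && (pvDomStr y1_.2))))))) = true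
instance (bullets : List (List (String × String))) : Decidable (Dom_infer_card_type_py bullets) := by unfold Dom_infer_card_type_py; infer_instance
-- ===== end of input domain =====

-- B is a different decomposition: one existence-tracking pass with two booleans and
-- early exit instead of two counting passes; equivalence of return values is proved below.

-- ===== PORT A =====
def infer_card_type_py (bullets : List (List (String × String))) : String :=
  if bullets = [] then "UNKNOWN"
  else
    let why_count : Int :=
      bullets.foldl (fun acc b =>
        if (PySem.Dict.mk b).get? "direction" == some "WHY" then acc + 1 else acc) 0
    let why_not_count : Int :=
      bullets.foldl (fun acc b =>
        if (PySem.Dict.mk b).get? "direction" == some "WHY_NOT" then acc + 1 else acc) 0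
    if why_count ≥ 1 ∧ why_not_count ≥ 1 then "BALANCED_EXPLAIN"
    else if why_count > 0 ∧ why_not_count = 0 then "WHY_ONLY"
    else "UNKNOWN"

-- ===== PORT B =====
-- the for-loop with break: returns (has_why, has_why_not)
def inferAltLoop : List (List (String × String)) → Bool → Bool → Bool × Bool
  | [], hw, hwn => (hw, hwn)
  | b :: rest, hw, hwn =>
    let d := (PySem.Dict.mk b).get? "direction"
    let hw' := if d == some "WHY" then true else hw
    let hwn' := if !(d == some "WHY") && d == some "WHY_NOT" then true else hwn
    if hw' && hwn' then (hw', hwn') else inferAltLoop rest hw' hwn'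

def infer_card_type_py_alt (bullets : List (List (String × String))) : String :=
  let r := inferAltLoop bullets false false
  if r.1 && r.2 then "BALANCED_EXPLAIN"
  else if r.1 then "WHY_ONLY"
  else "UNKNOWN"

-- ===== PRECONDITION & SPEC =====
def Spec_infer_card_type_py (bullets : List (List (String × String))) (out : String) : Prop := out = infer_card_type_py_alt bullets
instance (bullets : List (List (String × String))) (out : String) : Decidable (Spec_infer_card_type_py bullets out) := by unfold Spec_infer_card_type_py; infer_instance

-- ===== CLAIM (what is proved, stated in full; the proofs are below) =====
def Claim_equal_infer_card_type_py : Prop := ∀ (bullets : List (List (String × String))), Dom_infer_card_type_py bullets → Spec_infer_card_type_py bullets (infer_card_type_py bullets)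

-- ===== LEMMAS AND PROOFS =====

-- the counting fold of A counts with countP
theorem count_fold_eq (l : List (List (String × String))) (p : List (String × String) → Bool) (acc : Int) :
    l.foldl (fun acc b => if p b then acc + 1 else acc) acc = acc + l.countP p := by
  induction l generalizing acc with
  | nil => simp
  | cons b rest ih =>
    simp only [List.foldl_cons, List.countP_cons]
    by_cases h : p b = true <;> simp [h, ih] <;> omega

-- B's loop computes plain existence, despite elif and break
theorem inferAltLoop_eq (l : List (List (String × String))) (hw hwn : Bool) :
    inferAltLoop l hw hwn =
      (hw || l.any (fun b => (PySem.Dict.mk b).get? "direction" == some "WHY"),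
       hwn || l.any (fun b => (PySem.Dict.mk b).get? "direction" == some "WHY_NOT")) := by
  induction l generalizing hw hwn with
  | nil => simp [inferAltLoop]
  | cons b rest ih =>
    simp only [inferAltLoop, List.any_cons]
    by_cases h1 : ((PySem.Dict.mk b).get? "direction" == some "WHY") = true
    · have h2 : ((PySem.Dict.mk b).get? "direction" == some "WHY_NOT") = false := by
        rw [beq_iff_eq.mp h1]; decide
      cases hwn <;> simp [h1, h2, ih]
    · simp only [Bool.not_eq_true] at h1
      by_cases h2 : ((PySem.Dict.mk b).get? "direction" == some "WHY_NOT") = true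
      · cases hw <;> simp [h1, h2, ih]
      · simp only [Bool.not_eq_true] at h2
        cases hw <;> cases hwn <;> simp [h1, h2, ih]

theorem countP_pos_iff_any (l : List (List (String × String))) (p : List (String × String) → Bool) :
    (1 ≤ (l.countP p : Int)) ↔ l.any p = true := by
  rw [List.any_eq_true]
  constructor
  · intro h
    have : 0 < l.countP p := by exact_mod_cast h
    rw [List.countP_pos_iff] at this
    exact this
  · intro h
    have : 0 < l.countP p := List.countP_pos_iff.mpr h
    exact_mod_cast this

-- ===== VERDICT (by name: the statement is the Claim_ definition above) =====
theorem infer_card_type_py_spec : Claim_equal_infer_card_type_py := by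
  intro bullets _
  unfold Spec_infer_card_type_py infer_card_type_py infer_card_type_py_alt
  rw [inferAltLoop_eq]
  simp only [count_fold_eq, zero_add, Bool.false_or]
  by_cases hnil : bullets = []
  · subst hnil; simp
  · simp only [hnil, if_false]
    by_cases h1 : bullets.any (fun b => (PySem.Dict.mk b).get? "direction" == some "WHY") = true
    · by_cases h2 : bullets.any (fun b => (PySem.Dict.mk b).get? "direction" == some "WHY_NOT") = true
      · have c1 := (countP_pos_iff_any bullets _).mpr h1
        have c2 := (countP_pos_iff_any bullets _).mpr h2
        simp only [h1, h2, Bool.and_self, if_pos (And.intro c1 c2)]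
        simp
      · have c1 := (countP_pos_iff_any bullets _).mpr h1
        have c2 : ¬ (1 ≤ (bullets.countP (fun b => (PySem.Dict.mk b).get? "direction" == some "WHY_NOT") : Int)) :=
          fun h => h2 ((countP_pos_iff_any bullets _).mp h)
        have c2' : (bullets.countP (fun b => (PySem.Dict.mk b).get? "direction" == some "WHY_NOT") : Int) = 0 := by omega
        simp only [Bool.not_eq_true] at h2
        simp only [h1, h2, Bool.and_false]
        rw [if_neg (by exact fun h => c2 h.2), if_pos (And.intro (by omega) c2')]
        simp
    · have c1 : ¬ (1 ≤ (bullets.countP (fun b => (PySem.Dict.mk b).get? "direction" == some "WHY") : Int)) :=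
        fun h => h1 ((countP_pos_iff_any bullets _).mp h)
      simp only [Bool.not_eq_true] at h1
      simp only [h1, Bool.false_and]
      rw [if_neg (fun h => c1 h.1), if_neg (fun h => c1 (by omega)), if_neg (by decide), if_neg (by decide)]
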